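-- pv_equiv track=rewrite | github.com/jaredxfeng/pycheckio | find_enemy.py | get_relative_steps
-- ===== SOURCE A (Python) =====
-- def get_relative_steps(steps, dir):
--     dirs = ["N", "NE", "SE", "S", "SW", "NW"]
--     i = dirs.index(dir)
--     dirs_rotated = dirs[i:] + dirs[:-(6 - i)]
--     dir_map = {direction: new_direction
--         for new_direction, direction in zip(dirs, dirs_rotated)}
--     relative_steps = [dir_map[step] for step in steps]
--     return relative_steps
-- ===== SOURCE B (Python) =====
-- PREV = {"N": "NW", "NE": "N", "SE": "NE", "S": "SE", "SW": "S", "NW": "SW"}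
--
-- def get_relative_steps(steps, dir):
--     # Recursively rotate the whole scene one step counter-clockwise until the
--     # reference direction is "N"; then the steps are already relative.
--     if dir == "N":
--         return list(steps)
--     return get_relative_steps([PREV[s] for s in steps], PREV[dir])
-- ===== Notes on version B (the rewrite author's own statement) =====
-- stated objective: simpler
-- what changed: B drops A's rotated slice and zip-built direction-to-direction map entirely: it recursively rotates the reference direction and every step one notch counter-clockwise through a fixed predecessor permutation until the reference is N, at which point the steps are the answer.
import Mathlib
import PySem

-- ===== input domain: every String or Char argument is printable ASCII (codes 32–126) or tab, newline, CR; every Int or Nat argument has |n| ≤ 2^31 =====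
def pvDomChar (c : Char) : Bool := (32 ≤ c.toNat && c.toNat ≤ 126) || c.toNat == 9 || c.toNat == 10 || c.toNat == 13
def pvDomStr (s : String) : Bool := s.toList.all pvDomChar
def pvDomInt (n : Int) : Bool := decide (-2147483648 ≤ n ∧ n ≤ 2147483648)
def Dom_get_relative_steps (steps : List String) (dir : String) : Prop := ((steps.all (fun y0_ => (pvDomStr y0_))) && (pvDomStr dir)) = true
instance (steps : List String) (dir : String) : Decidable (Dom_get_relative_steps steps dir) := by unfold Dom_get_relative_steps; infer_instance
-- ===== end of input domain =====

-- B replaces A's rotated-list + zip-built direction→direction map by recursive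
-- normalization: rotate dir and all steps one notch counter-clockwise (a fixed
-- predecessor permutation) until dir is "N" — no table construction.

-- ===== PORT A =====
def get_relative_steps (steps : List String) (dir : String) : List String :=
  let dirs : List String := ["N", "NE", "SE", "S", "SW", "NW"]
  match PySem.List.index? dirs dir with
  | none => []   -- ValueError in Python; excluded by Pre_
  | some i =>
    let dirs_rotated := PySem.List.slice dirs (some (i : Int)) none ++
                        PySem.List.slice dirs none (some (-(6 - (i : Int))))
    let dir_map : PySem.Dict String String :=
      (dirs.zip dirs_rotated).foldl
        (fun d p => PySem.Dict.insert d p.2 p.1) PySem.Dict.empty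
    steps.map (fun step => (PySem.Dict.get? dir_map step).getD "")  -- none = KeyError; excluded by Pre_

-- ===== PORT B =====
-- the constant dict PREV of Source B
def pvPrev : PySem.Dict String String :=
  PySem.Dict.ofList [("N", "NW"), ("NE", "N"), ("SE", "NE"), ("S", "SE"), ("SW", "S"), ("NW", "SW")]

-- termination measure for B's recursion: how many PREV-rotations bring dir to "N"
def pvRank (d : String) : Nat :=
  if d = "NE" then 1 else if d = "SE" then 2 else if d = "S" then 3
  else if d = "SW" then 4 else if d = "NW" then 5 else 0

-- lookup in the literal dict PREV, as a chain of ifs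
theorem pvPrev_get (d : String) :
    PySem.Dict.get? pvPrev d =
      if d = "N" then some "NW" else if d = "NE" then some "N" else if d = "SE" then some "NE"
      else if d = "S" then some "SE" else if d = "SW" then some "S" else if d = "NW" then some "SW"
      else none := by
  have h : pvPrev = PySem.Dict.mk
      [("N", "NW"), ("NE", "N"), ("SE", "NE"), ("S", "SE"), ("SW", "S"), ("NW", "SW")] := by decide
  rw [h]
  simp only [PySem.Dict.get?_mk_cons]
  split_ifs <;> simp_all <;> rfl

-- B's recursion terminates: one PREV-rotation strictly decreases the rank
theorem pvPrev_rank {d d' : String} (h : PySem.Dict.get? pvPrev d = some d') (hn : d ≠ "N") :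
    pvRank d' < pvRank d := by
  rw [pvPrev_get] at h
  split_ifs at h <;> cases h <;> subst_vars <;> first | exact absurd rfl hn | decide

def get_relative_steps_alt (steps : List String) (dir : String) : List String :=
  if hn : dir = "N" then steps
  else
    match h : PySem.Dict.get? pvPrev dir with
    | none => []   -- KeyError in Python (bad dir); excluded by Pre_
    | some d =>
      get_relative_steps_alt
        (steps.map (fun s => (PySem.Dict.get? pvPrev s).getD ""))  -- none = KeyError; excluded by Pre_
        d
termination_by pvRank dir
decreasing_by exact pvPrev_rank h hn

-- ===== PRECONDITION & SPEC =====
-- Pre_ excludes exactly the inputs where Python A raises: dir not one of the six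
-- directions (ValueError) or some step not one of them (KeyError).
def Pre_get_relative_steps (steps : List String) (dir : String) : Prop :=
  dir ∈ ["N", "NE", "SE", "S", "SW", "NW"] ∧
  ∀ s ∈ steps, s ∈ ["N", "NE", "SE", "S", "SW", "NW"]
instance (steps : List String) (dir : String) : Decidable (Pre_get_relative_steps steps dir) := by
  unfold Pre_get_relative_steps; infer_instance

def pvWitness_get_relative_steps : List String × String := (["N", "SW", "NE", "NE"], "SE")

def Spec_get_relative_steps (steps : List String) (dir : String) (out : List String) : Prop := out = get_relative_steps_alt steps dir
instance (steps : List String) (dir : String) (out : List String) : Decidable (Spec_get_relative_steps steps dir out) := by unfold Spec_get_relative_steps; infer_instance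

-- ===== CLAIM (what is proved, stated in full; the proofs are below) =====
def Claim_equal_get_relative_steps : Prop := ∀ (steps : List String) (dir : String), Dom_get_relative_steps steps dir → Pre_get_relative_steps steps dir → Spec_get_relative_steps steps dir (get_relative_steps steps dir)

-- ===== LEMMAS AND PROOFS =====

-- one recursion step and the base case of B, as rewrite rules
theorem pv_alt_step (steps : List String) (d d' : String) (hn : ¬ d = "N")
    (h : PySem.Dict.get? pvPrev d = some d') :
    get_relative_steps_alt steps d =
      get_relative_steps_alt (steps.map (fun s => (PySem.Dict.get? pvPrev s).getD "")) d' := by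
  conv_lhs => rw [get_relative_steps_alt.eq_def]
  rw [dif_neg hn]
  split
  · simp_all
  · rename_i x hx
    rw [h] at hx
    injection hx with hx
    subst hx
    rfl

theorem pv_alt_N (steps : List String) : get_relative_steps_alt steps "N" = steps := by
  rw [get_relative_steps_alt.eq_def]
  rfl

-- full unfoldings of B for each valid reference direction
theorem pv_alt_NE (steps : List String) :
    get_relative_steps_alt steps "NE" = steps.map (fun s => (PySem.Dict.get? pvPrev s).getD "") := by
  rw [pv_alt_step steps "NE" "N" (by decide) (by simp [pvPrev_get]), pv_alt_N]

theorem pv_alt_SE (steps : List String) :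
    get_relative_steps_alt steps "SE" =
      (steps.map (fun s => (PySem.Dict.get? pvPrev s).getD "")).map (fun s => (PySem.Dict.get? pvPrev s).getD "") := by
  rw [pv_alt_step steps "SE" "NE" (by decide) (by simp [pvPrev_get]), pv_alt_NE]

theorem pv_alt_S (steps : List String) :
    get_relative_steps_alt steps "S" =
      ((steps.map (fun s => (PySem.Dict.get? pvPrev s).getD "")).map (fun s => (PySem.Dict.get? pvPrev s).getD "")).map (fun s => (PySem.Dict.get? pvPrev s).getD "") := by
  rw [pv_alt_step steps "S" "SE" (by decide) (by simp [pvPrev_get]), pv_alt_SE]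

theorem pv_alt_SW (steps : List String) :
    get_relative_steps_alt steps "SW" =
      (((steps.map (fun s => (PySem.Dict.get? pvPrev s).getD "")).map (fun s => (PySem.Dict.get? pvPrev s).getD "")).map (fun s => (PySem.Dict.get? pvPrev s).getD "")).map (fun s => (PySem.Dict.get? pvPrev s).getD "") := by
  rw [pv_alt_step steps "SW" "S" (by decide) (by simp [pvPrev_get]), pv_alt_S]

theorem pv_alt_NW (steps : List String) :
    get_relative_steps_alt steps "NW" =
      ((((steps.map (fun s => (PySem.Dict.get? pvPrev s).getD "")).map (fun s => (PySem.Dict.get? pvPrev s).getD "")).map (fun s => (PySem.Dict.get? pvPrev s).getD "")).map (fun s => (PySem.Dict.get? pvPrev s).getD "")).map (fun s => (PySem.Dict.get? pvPrev s).getD "") := by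
  rw [pv_alt_step steps "NW" "SW" (by decide) (by simp [pvPrev_get]), pv_alt_SW]

-- each port distributes over cons of the step list (for a valid dir on the B side)
theorem pv_cons_a (d a : String) (rest : List String) :
    get_relative_steps (a :: rest) d = get_relative_steps [a] d ++ get_relative_steps rest d := by
  simp only [get_relative_steps]
  cases PySem.List.index? ["N", "NE", "SE", "S", "SW", "NW"] d <;> simp

theorem pv_cons_b (d a : String) (rest : List String)
    (hd : d ∈ ["N", "NE", "SE", "S", "SW", "NW"]) :
    get_relative_steps_alt (a :: rest) d = get_relative_steps_alt [a] d ++ get_relative_steps_alt rest d := by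
  fin_cases hd <;>
    simp [pv_alt_N, pv_alt_NE, pv_alt_SE, pv_alt_S, pv_alt_SW, pv_alt_NW]

-- agreement of the two per-step computations, checked on all 6 × 6 direction pairs
theorem pv_pointwise (d s : String)
    (hd : d ∈ ["N", "NE", "SE", "S", "SW", "NW"])
    (hs : s ∈ ["N", "NE", "SE", "S", "SW", "NW"]) :
    get_relative_steps [s] d = get_relative_steps_alt [s] d := by
  fin_cases hd <;> fin_cases hs <;>
    simp only [pv_alt_N, pv_alt_NE, pv_alt_SE, pv_alt_S, pv_alt_SW, pv_alt_NW, List.map_cons, List.map_nil] <;> decide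

theorem pv_main (steps : List String) (dir : String)
    (h : Pre_get_relative_steps steps dir) :
    get_relative_steps steps dir = get_relative_steps_alt steps dir := by
  obtain ⟨hd, hs⟩ := h
  induction steps with
  | nil =>
    fin_cases hd <;>
      simp only [pv_alt_N, pv_alt_NE, pv_alt_SE, pv_alt_S, pv_alt_SW, pv_alt_NW, List.map_nil] <;> decide
  | cons a rest ih =>
    rw [pv_cons_a, pv_cons_b dir a rest hd, pv_pointwise dir a hd (hs a (by simp)),
        ih (fun s hm => hs s (by simp [hm]))]

-- ===== VERDICT (by name: the statement is the Claim_ definition above) =====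
theorem get_relative_steps_spec : Claim_equal_get_relative_steps := by
  intro steps dir _ hpre
  exact pv_main steps dir hpre
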